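-- pv_equiv track=rewrite | github.com/hahyuning/Coding-test-study | baekjoon/브루트포스/재귀 (Hard)/2447 별 찍기10.py | solution
-- ===== SOURCE A (Python) =====
-- def solution(l):
--     if l == 1:
--         return ["*"]
--     stars = solution(l // 3)
--     tmp = []
--     for s in stars:
--         tmp.append(s * 3)
--     for s in stars:
--         tmp.append(s + " " * (l // 3) + s)
--     for s in stars:
--         tmp.append(s * 3)
--     return tmp
-- ===== SOURCE B (Python) =====
-- def solution(l):
--     # Sizes along the //3 chain, outermost first; then build each row directly
--     # from the base-3 digits of its index (digit 1 at level t inserts the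
--     # level-t gap, any other digit triples the inner row).
--     chain = []
--     v = l
--     while v > 1:
--         chain.append(v)
--         v //= 3
--     rows = []
--     for i in range(3 ** len(chain)):
--         s = "*"
--         e = 0
--         for v in reversed(chain):
--             if i // 3 ** e % 3 == 1:
--                 s = s + " " * (v // 3) + s
--             else:
--                 s = s + s + s
--             e += 1
--         rows.append(s)
--     return rows
-- ===== Notes on version B (the rewrite author's own statement) =====
-- stated objective: alternative
-- what changed: Replaces A's top-down recursion (build the l//3 pattern, then triple/frame each line in three list passes) by an iterative construction: compute the //3 size chain once, then build every row independently from the base-3 digits of its row index.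
import Mathlib
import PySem

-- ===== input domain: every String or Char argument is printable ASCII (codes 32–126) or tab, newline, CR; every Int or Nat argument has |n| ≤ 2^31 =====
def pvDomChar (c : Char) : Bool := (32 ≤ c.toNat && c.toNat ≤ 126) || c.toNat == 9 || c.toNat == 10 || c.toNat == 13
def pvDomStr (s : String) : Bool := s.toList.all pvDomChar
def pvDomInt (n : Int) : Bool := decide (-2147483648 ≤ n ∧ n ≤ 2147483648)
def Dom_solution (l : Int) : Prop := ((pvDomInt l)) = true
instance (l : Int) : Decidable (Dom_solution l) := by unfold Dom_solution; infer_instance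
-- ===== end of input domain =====

-- B replaces A's recursion (build the l//3 pattern, then triple/frame every line) by an
-- iterative construction: compute the //3 size chain once, then build each row directly
-- from the base-3 digits of its index.  Same values wherever A returns; not faster.

-- ===== PORT A =====
-- Strings are carried as List Char (PySem.Chars convention); String.mk at the boundary.
-- Python's recursion 'solution(l // 3)' is made total with a fuel counter; on every
-- input admitted by Pre_solution the fuel l.natAbs + 1 exceeds the recursion depth.
def solutionChars : Nat → Int → List (List Char)
  | 0, _ => []
  | fuel+1, l =>
    if l == 1 then [['*']]
    else
      let stars := solutionChars fuel (PySem.Int.floordiv l 3)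
      let tmp := stars.foldl (fun acc s => acc ++ [PySem.List.pyRepeat s 3]) []
      let tmp := stars.foldl
        (fun acc s => acc ++ [s ++ PySem.List.pyRepeat [' '] (PySem.Int.floordiv l 3) ++ s]) tmp
      stars.foldl (fun acc s => acc ++ [PySem.List.pyRepeat s 3]) tmp

def solution (l : Int) : List String :=
  (solutionChars (l.natAbs + 1) l).map String.mk

-- ===== PORT B =====
-- 'while v > 1' as fuel recursion; on every input the loop shrinks v, so l.natAbs + 1 steps suffice.
def chainFuel : Nat → Int → List Int
  | 0, _ => []
  | fuel+1, v => if 1 < v then v :: chainFuel fuel (PySem.Int.floordiv v 3) else []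

-- one iteration of B's inner 'for v in reversed(chain)' body; state = (row chars, exponent e)
def rowStep (i : Int) (p : List Char × Nat) (v : Int) : List Char × Nat :=
  (if PySem.Int.mod (PySem.Int.floordiv i ((3:Int) ^ p.2)) 3 == 1 then
      p.1 ++ PySem.List.pyRepeat [' '] (PySem.Int.floordiv v 3) ++ p.1
    else p.1 ++ p.1 ++ p.1,
   p.2 + 1)

def solution_alt (l : Int) : List String :=
  let chain := chainFuel (l.natAbs + 1) l
  (PySem.List.pyRange 0 ((3:Int) ^ chain.length) 1).map (fun i =>
    String.mk ((chain.reverse.foldl (rowStep i) (['*'], 0)).1))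

-- ===== PRECONDITION & SPEC =====
-- Exactly the inputs on which Python A returns: the //3 chain from l reaches 1, i.e.
-- 3^k ≤ l < 2*3^k for some k (elsewhere A's recursion never terminates — RecursionError).
-- The bound k ≤ log2 l is no restriction (3^k ≤ l forces 2^k ≤ l, i.e. k ≤ log2 l);
-- it only makes the ∃ decidable (and quickly evaluable).
def Pre_solution (l : Int) : Prop := ∃ k ≤ Nat.log2 l.toNat, (3:Int) ^ k ≤ l ∧ l < 2 * 3 ^ k
instance (l : Int) : Decidable (Pre_solution l) := by unfold Pre_solution; infer_instance
def pvWitness_solution : Int := 9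

def Spec_solution (l : Int) (out : List String) : Prop := out = solution_alt l
instance (l : Int) (out : List String) : Decidable (Spec_solution l out) := by
  unfold Spec_solution; infer_instance

-- ===== CLAIM (what is proved, stated in full; the proofs are below) =====
def Claim_equal_solution : Prop :=
  ∀ (l : Int), Dom_solution l → Pre_solution l → Spec_solution l (solution l)

-- ===== LEMMAS AND PROOFS =====

-- the //3 size chain of length k (proof-side mirror of chainFuel)
def chainL : Nat → Int → List Int
  | 0, _ => []
  | k+1, l => l :: chainL k (PySem.Int.floordiv l 3)

-- the pattern determined by a size chain (outermost size first)
def Rows : List Int → List (List Char)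
  | [] => [['*']]
  | v :: c =>
      (Rows c).map (fun r => r ++ r ++ r)
        ++ ((Rows c).map
              (fun r => r ++ List.replicate (PySem.Int.floordiv v 3).toNat ' ' ++ r)
        ++ (Rows c).map (fun r => r ++ r ++ r))

-- row of index i, built from i's base-3 digits (most significant digit outermost)
def rowR : List Int → Int → List Char
  | [], _ => ['*']
  | v :: c, i =>
      if PySem.Int.mod (PySem.Int.floordiv i ((3:Int) ^ c.length)) 3 == 1 then
        rowR c i ++ List.replicate (PySem.Int.floordiv v 3).toNat ' ' ++ rowR c i
      else rowR c i ++ rowR c i ++ rowR c i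

theorem chainL_length (k : Nat) (l : Int) : (chainL k l).length = k := by
  induction k generalizing l with
  | zero => rfl
  | succ k ih => simp [chainL, ih]

theorem foldl_rowStep_eq_rowR (c : List Int) (i : Int) :
    c.reverse.foldl (rowStep i) (['*'], 0) = (rowR c i, c.length) := by
  induction c with
  | nil => rfl
  | cons v c ih =>
    rw [List.reverse_cons, List.foldl_append, ih]
    simp [rowStep, rowR]

theorem pyRepeat_three (r : List Char) : PySem.List.pyRepeat r 3 = r ++ r ++ r := by
  simp [PySem.List.pyRepeat]

-- the digit of ↑(b * 3^k + r) at position k, for r < 3^k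
theorem digit_msd (k b r : Nat) (hr : r < 3 ^ k) :
    PySem.Int.mod (PySem.Int.floordiv ((b * 3 ^ k + r : Nat) : Int) ((3:Int) ^ k)) 3
      = ((b % 3 : Nat) : Int) := by
  have h1 : ((3:Int) ^ k) = ((3 ^ k : Nat) : Int) := by push_cast; ring
  rw [h1]
  have h2 : PySem.Int.floordiv ((b * 3 ^ k + r : Nat) : Int) ((3 ^ k : Nat) : Int)
      = (((b * 3 ^ k + r) / 3 ^ k : Nat) : Int) := PySem.Int.floordiv_natCast _ _
  rw [h2]
  have h3 : (b * 3 ^ k + r) / 3 ^ k = b := by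
    have hp : (0:Nat) < 3 ^ k := by positivity
    rw [Nat.add_comm, Nat.add_mul_div_right _ _ hp, Nat.div_eq_of_lt hr, Nat.zero_add]
  rw [h3]
  exact_mod_cast PySem.Int.mod_natCast b 3

-- rowR only depends on the base-3 digits below the chain length
theorem rowR_mod (c : List Int) :
    ∀ b r : Nat, r < 3 ^ c.length →
      rowR c ((b * 3 ^ c.length + r : Nat) : Int) = rowR c ((r : Nat) : Int) := by
  induction c with
  | nil => intro b r _; rfl
  | cons v c ih =>
    intro b r hr
    have hp : (0:Nat) < 3 ^ c.length := by positivity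
    have hL : (v :: c).length = c.length + 1 := rfl
    rw [hL] at hr
    have hsplit : r = r / 3 ^ c.length * 3 ^ c.length + r % 3 ^ c.length := by
      rw [Nat.mul_comm (r / 3 ^ c.length) (3 ^ c.length)]
      exact (Nat.div_add_mod _ _).symm
    have harg1 : b * 3 ^ (c.length + 1) + r
        = (3 * b + r / 3 ^ c.length) * 3 ^ c.length + r % 3 ^ c.length := by
      conv_lhs => rw [hsplit]
      ring
    simp only [rowR]
    rw [show ((b * 3 ^ (v::c).length + r : Nat) : Int)
          = (((3 * b + r / 3 ^ c.length) * 3 ^ c.length + r % 3 ^ c.length : Nat) : Int) from by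
        rw [hL, harg1]]
    conv_rhs =>
      rw [show ((r : Nat) : Int)
            = ((r / 3 ^ c.length * 3 ^ c.length + r % 3 ^ c.length : Nat) : Int) from by
          rw [← hsplit]]
    rw [digit_msd _ _ _ (Nat.mod_lt _ hp), digit_msd _ _ _ (Nat.mod_lt _ hp)]
    have hmod3 : (3 * b + r / 3 ^ c.length) % 3 = r / 3 ^ c.length % 3 := by omega
    rw [hmod3, ih _ _ (Nat.mod_lt _ hp), ih _ _ (Nat.mod_lt _ hp)]

-- one cons step of rowR at a decomposed index
theorem rowR_cons_digit (v : Int) (c : List Int) (b i : Nat) (hb : b < 3)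
    (hi : i < 3 ^ c.length) :
    rowR (v :: c) ((b * 3 ^ c.length + i : Nat) : Int)
      = (if b = 1 then
           rowR c ((i : Nat) : Int) ++ List.replicate (PySem.Int.floordiv v 3).toNat ' '
             ++ rowR c ((i : Nat) : Int)
         else rowR c ((i : Nat) : Int) ++ rowR c ((i : Nat) : Int) ++ rowR c ((i : Nat) : Int)) := by
  rw [rowR.eq_2]
  rw [digit_msd c.length b i hi, rowR_mod c b i hi]
  have hcond : (((b % 3 : Nat) : Int) == 1) = decide (b = 1) := by
    rw [Nat.mod_eq_of_lt hb]
    by_cases h : b = 1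
    · simp [h]
    · simp [h, Nat.cast_eq_one]
  rw [hcond]
  by_cases hb1 : b = 1 <;> simp [hb1]

-- Rows is rowR over all row indices
theorem Rows_eq_map (c : List Int) :
    Rows c = (List.range (3 ^ c.length)).map (fun i => rowR c ((i : Nat) : Int)) := by
  induction c with
  | nil => rfl
  | cons v c ih =>
    have hL : (v :: c).length = c.length + 1 := rfl
    rw [hL, show (3:Nat) ^ (c.length + 1) = 3 ^ c.length + (3 ^ c.length + 3 ^ c.length) from by
      ring]
    rw [List.range_add, List.range_add]
    simp only [List.map_append, List.map_map]
    show Rows (v :: c) = _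
    rw [Rows, ih]
    simp only [List.map_map]
    congr 1
    · apply List.map_congr_left
      intro i hi
      simp only [Function.comp_apply]
      have := rowR_cons_digit v c 0 i (by norm_num) (List.mem_range.mp hi)
      rw [Nat.zero_mul, Nat.zero_add] at this
      rw [this]
      norm_num
    congr 1
    · apply List.map_congr_left
      intro i hi
      simp only [Function.comp_apply]
      have := rowR_cons_digit v c 1 i (by norm_num) (List.mem_range.mp hi)
      rw [Nat.one_mul] at this
      rw [this]
      norm_num
    · apply List.map_congr_left
      intro i hi
      simp only [Function.comp_apply]
      have := rowR_cons_digit v c 2 i (by norm_num) (List.mem_range.mp hi)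
      rw [show 2 * 3 ^ c.length + i = 3 ^ c.length + (3 ^ c.length + i) from by ring] at this
      rw [this]
      norm_num

theorem three_le_pow_succ (k : Nat) : (3:Int) ≤ 3 ^ (k + 1) := by
  calc (3:Int) = 3 ^ 1 := by ring
  _ ≤ 3 ^ (k + 1) := by
    apply pow_le_pow_right₀ (by norm_num)
    omega

-- chainFuel computes chainL on inputs whose chain reaches 1
theorem chainFuel_eq_chainL (k : Nat) :
    ∀ (l : Int) (f : Nat), k ≤ f → (3:Int) ^ k ≤ l → l < 2 * 3 ^ k →
      chainFuel (f + 1) l = chainL k l := by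
  induction k with
  | zero =>
    intro l f _ h1 h2
    have hl : l = 1 := by
      rw [pow_zero] at h1 h2
      omega
    subst hl
    simp [chainFuel, chainL]
  | succ k ih =>
    intro l f hf h1 h2
    obtain ⟨f', rfl⟩ : ∃ f', f = f' + 1 := ⟨f - 1, by omega⟩
    have h1l : 1 < l := by
      have := three_le_pow_succ k
      omega
    have hm1 : (3:Int) ^ k ≤ PySem.Int.floordiv l 3 := by
      rw [PySem.Int.le_floordiv_iff_mul_le (by norm_num)]
      calc (3:Int) ^ k * 3 = 3 ^ (k + 1) := by ring
      _ ≤ l := h1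
    have hm2 : PySem.Int.floordiv l 3 < 2 * 3 ^ k := by
      rw [PySem.Int.floordiv_lt_iff_lt_mul (by norm_num)]
      calc l < 2 * 3 ^ (k + 1) := h2
      _ = 2 * 3 ^ k * 3 := by ring
    rw [chainFuel, if_pos h1l, ih _ f' (by omega) hm1 hm2]
    rfl

-- A computes Rows of the chain
theorem solutionChars_eq_Rows (k : Nat) :
    ∀ (l : Int) (f : Nat), k ≤ f → (3:Int) ^ k ≤ l → l < 2 * 3 ^ k →
      solutionChars (f + 1) l = Rows (chainL k l) := by
  induction k with
  | zero =>
    intro l f _ h1 h2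
    have hl : l = 1 := by
      rw [pow_zero] at h1 h2
      omega
    subst hl
    simp [solutionChars, chainL, Rows]
  | succ k ih =>
    intro l f hf h1 h2
    obtain ⟨f', rfl⟩ : ∃ f', f = f' + 1 := ⟨f - 1, by omega⟩
    have h1l : 1 < l := by
      have := three_le_pow_succ k
      omega
    have hne : (l == 1) = false := by
      simp only [beq_eq_false_iff_ne, ne_eq]
      omega
    have hm1 : (3:Int) ^ k ≤ PySem.Int.floordiv l 3 := by
      rw [PySem.Int.le_floordiv_iff_mul_le (by norm_num)]
      calc (3:Int) ^ k * 3 = 3 ^ (k + 1) := by ring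
      _ ≤ l := h1
    have hm2 : PySem.Int.floordiv l 3 < 2 * 3 ^ k := by
      rw [PySem.Int.floordiv_lt_iff_lt_mul (by norm_num)]
      calc l < 2 * 3 ^ (k + 1) := h2
      _ = 2 * 3 ^ k * 3 := by ring
    rw [solutionChars, hne]
    simp only [Bool.false_eq_true, if_false]
    rw [ih _ f' (by omega) hm1 hm2]
    rw [PySem.List.foldl_append_singleton_eq_map, PySem.List.foldl_append_singleton_eq_map,
      PySem.List.foldl_append_singleton_eq_map]
    have hrep : PySem.List.pyRepeat [' '] (PySem.Int.floordiv l 3)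
        = List.replicate (PySem.Int.floordiv l 3).toNat ' ' :=
      PySem.List.pyRepeat_singleton _ _
    simp only [hrep, pyRepeat_three, List.nil_append, List.append_assoc]
    show _ = Rows (l :: chainL k (PySem.Int.floordiv l 3))
    rw [Rows]
    simp [List.append_assoc]

-- ===== VERDICT (by name: the statement is the Claim_ definition above) =====
theorem solution_spec : Claim_equal_solution := by
  intro l _ hPre
  unfold Spec_solution solution solution_alt
  obtain ⟨k, _, h1, h2⟩ := hPre
  have hkpow : (k : Int) < 3 ^ k := by
    exact_mod_cast Nat.lt_pow_self (a := 3) (n := k) (by norm_num)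
  have hk_le : k ≤ l.natAbs := by omega
  rw [solutionChars_eq_Rows k l l.natAbs hk_le h1 h2]
  simp only [chainFuel_eq_chainL k l l.natAbs hk_le h1 h2, chainL_length]
  rw [Rows_eq_map, chainL_length]
  have hpow : ((3:Int) ^ k) = ((3 ^ k : Nat) : Int) := by push_cast; ring
  rw [hpow, PySem.List.pyRange_one]
  simp only [Int.sub_zero, Int.toNat_natCast, List.map_map]
  apply List.map_congr_left
  intro i _
  simp only [Function.comp_apply, zero_add]
  rw [foldl_rowStep_eq_rowR]
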